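-- pv_equiv track=rewrite | github.com/danvk/quordlebot | gofor5.py | score_for_opener
-- ===== SOURCE A (Python) =====
-- from typing import Dict
--
-- def groupby(xs, fn):
--     out = {}
--     for x in xs:
--         v = fn(x)
--         out.setdefault(v, []).append(x)
--     return out
--
-- def score_for_opener(lookup: Dict[str, Dict[str, str]], guess: str):
--     results = groupby(
--         (
--             (pattern, solution)
--             for solution, guesses in lookup.items()
--             for g, pattern in guesses.items()
--             if g == guess
--         ),
--         lambda pair: pair[0]
--     )
--     score = 0
--     for pattern, possibilities in results.items():
--         n = len(possibilities)
--         if pattern == 'ggggg':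
--             score += 5
--         elif n == 1 or n == 2:
--             # one point for a fully-determined word,
--             # 0.5 points for each of the two words in a 50/50
--             score += 1
--     return score
-- ===== SOURCE B (Python) =====
-- def _points(prev, run):
--     if prev is None:
--         return 0
--     if prev == 'ggggg':
--         return 5
--     if run == 1 or run == 2:
--         return 1
--     return 0
--
-- def score_for_opener(lookup, guess):
--     # One sorted pass over the flat pattern list instead of a dict-of-groups:
--     # equal patterns are adjacent after sorting, so score maximal runs directly.
--     pats = sorted(pattern
--                   for guesses in lookup.values()
--                   for g, pattern in guesses.items()
--                   if g == guess)
--     score = 0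
--     run = 0
--     prev = None
--     for p in pats:
--         if p == prev:
--             run += 1
--         else:
--             score += _points(prev, run)
--             prev = p
--             run = 1
--     score += _points(prev, run)
--     return score
-- ===== Notes on version B (the rewrite author's own statement) =====
-- stated objective: alternative
-- what changed: Replaces A's hash-groupby dict of pattern->pairs with a flat pattern list that is sorted once and scored in a single run-length scan over adjacent equal patterns.
import Mathlib
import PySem

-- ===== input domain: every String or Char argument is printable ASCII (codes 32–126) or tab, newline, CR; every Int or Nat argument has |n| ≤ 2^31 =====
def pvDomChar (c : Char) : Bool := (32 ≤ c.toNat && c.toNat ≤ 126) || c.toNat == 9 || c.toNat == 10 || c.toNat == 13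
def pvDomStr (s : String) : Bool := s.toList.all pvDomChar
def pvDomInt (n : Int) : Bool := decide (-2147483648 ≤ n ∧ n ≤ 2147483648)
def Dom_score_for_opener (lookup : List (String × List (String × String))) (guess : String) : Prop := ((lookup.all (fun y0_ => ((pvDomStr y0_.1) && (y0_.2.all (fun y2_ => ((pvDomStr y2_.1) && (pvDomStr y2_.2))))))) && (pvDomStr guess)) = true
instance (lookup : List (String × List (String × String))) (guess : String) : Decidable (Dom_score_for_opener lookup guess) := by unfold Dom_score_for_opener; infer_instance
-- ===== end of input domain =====

-- B replaces A's hash-groupby dict of pattern groups by one sorted flat pattern list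
-- scored in a single run-length scan (alternative algorithm, same result).

-- ===== PORT A =====
def score_for_opener (lookup : List (String × List (String × String))) (guess : String) : Int :=
  -- the generator expression, as a flatMap producing (pattern, solution) pairs
  let pairs : List (String × String) :=
    lookup.flatMap (fun sg =>
      sg.2.flatMap (fun gp => if gp.1 == guess then [(gp.2, sg.1)] else []))
  -- groupby: out.setdefault(fn(x), []).append(x), fn = pair[0]
  let results : PySem.Dict String (List (String × String)) :=
    pairs.foldl (fun out x => out.modify x.1 [] (fun l => l ++ [x])) PySem.Dict.empty
  results.items.foldl (fun score pv =>
    if pv.1 == "ggggg" then score + 5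
    else if pv.2.length == 1 || pv.2.length == 2 then score + 1
    else score) 0

-- ===== PORT B =====
-- helper _points(prev, run) of Source B
def pvPoints (prev : Option String) (run : Int) : Int :=
  match prev with
  | none => 0
  | some p => if p == "ggggg" then 5 else if run == 1 || run == 2 then 1 else 0

-- body of Source B's for-loop over the sorted pattern list (state: score, run, prev)
def pvStep (st : Int × Int × Option String) (p : String) : Int × Int × Option String :=
  if some p == st.2.2 then (st.1, st.2.1 + 1, st.2.2)
  else (st.1 + pvPoints st.2.2 st.2.1, 1, some p)

def score_for_opener_alt (lookup : List (String × List (String × String))) (guess : String) : Int :=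
  let pats : List String :=
    PySem.List.sorted (lookup.flatMap (fun sg =>
      sg.2.flatMap (fun gp => if gp.1 == guess then [gp.2] else []))) (fun x => x) false
  let st := pats.foldl pvStep ((0 : Int), (0 : Int), (none : Option String))
  st.1 + pvPoints st.2.2 st.2.1

-- ===== PRECONDITION & SPEC =====
def Spec_score_for_opener (lookup : List (String × List (String × String))) (guess : String) (out : Int) : Prop := out = score_for_opener_alt lookup guess
instance (lookup : List (String × List (String × String))) (guess : String) (out : Int) : Decidable (Spec_score_for_opener lookup guess out) := by unfold Spec_score_for_opener; infer_instance

-- ===== CLAIM (what is proved, stated in full; the proofs are below) =====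
def Claim_equal_score_for_opener : Prop := ∀ (lookup : List (String × List (String × String))) (guess : String), Dom_score_for_opener lookup guess → Spec_score_for_opener lookup guess (score_for_opener lookup guess)

-- ===== LEMMAS AND PROOFS =====

-- the per-pattern contribution, as a function of the pattern's multiplicity
def pvContrib (l : List String) (k : String) : Int := pvPoints (some k) (l.count k : Int)

-- A's scoring loop is a sum of per-item contributions
theorem pvFoldScore (items : List (String × List (String × String))) (init : Int) :
    items.foldl (fun score pv =>
      if pv.1 == "ggggg" then score + 5
      else if pv.2.length == 1 || pv.2.length == 2 then score + 1
      else score) init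
    = init + (items.map (fun pv => pvPoints (some pv.1) (pv.2.length : Int))).sum := by
  induction items generalizing init with
  | nil => simp
  | cons pv rest ih =>
    simp only [List.foldl_cons, List.map_cons, List.sum_cons, ih]
    have h : pvPoints (some pv.1) (pv.2.length : Int)
        = if pv.1 == "ggggg" then 5
          else if pv.2.length == 1 || pv.2.length == 2 then 1 else 0 := by
      simp only [pvPoints]
      by_cases h5 : pv.1 == "ggggg" <;> simp [h5]
      split_ifs <;> omega
    rw [h]; split_ifs <;> ring

-- first components of A's (pattern, solution) pairs = B's flat pattern list
theorem pvPairsFst (lookup : List (String × List (String × String))) (guess : String) :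
    (lookup.flatMap (fun sg =>
      sg.2.flatMap (fun gp => if gp.1 == guess then [(gp.2, sg.1)] else []))).map Prod.fst
    = lookup.flatMap (fun sg =>
        sg.2.flatMap (fun gp => if gp.1 == guess then [gp.2] else [])) := by
  induction lookup with
  | nil => rfl
  | cons sg rest ih =>
    simp only [List.flatMap_cons, List.map_append, ih]
    congr 1
    induction sg.2 with
    | nil => rfl
    | cons gp gs ih2 =>
      simp only [List.flatMap_cons, List.map_append, ih2]
      congr 1
      by_cases h : gp.1 == guess <;> simp [h]

-- run-length scan over a sorted tail, continuing a live run of the previous value q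
theorem pvRunScan (s : List String) (hs : s.Pairwise (· ≤ ·)) :
    ∀ (sc run : Int) (q : String), (∀ x ∈ s, q ≤ x) →
      (let st := s.foldl pvStep (sc, run, some q); st.1 + pvPoints st.2.2 st.2.1)
      = sc + pvPoints (some q) (run + (s.count q : Int))
        + ∑ k ∈ s.toFinset.erase q, pvPoints (some k) ((s.count k : Int)) := by
  induction s with
  | nil => intro sc run q _; simp
  | cons x xs ih =>
    intro sc run q hq
    have hx : ∀ y ∈ xs, x ≤ y := fun y hy => (List.pairwise_cons.mp hs).1 y hy
    have hs' : xs.Pairwise (· ≤ ·) := (List.pairwise_cons.mp hs).2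
    by_cases hpq : x = q
    · subst hpq
      have hstep : pvStep (sc, run, some x) x = (sc, run + 1, some x) := by
        simp [pvStep]
      rw [List.foldl_cons, hstep, ih hs' sc (run + 1) x hx]
      have hcount : ((x :: xs).count x : Int) = (xs.count x : Int) + 1 := by
        rw [List.count_cons_self]; push_cast; ring
      have hfin : ((x :: xs).toFinset).erase x = xs.toFinset.erase x := by
        simp [List.toFinset_cons, Finset.erase_insert_eq_erase]
      rw [hcount, hfin]
      have harg : run + 1 + (xs.count x : Int) = run + ((xs.count x : Int) + 1) := by ring
      rw [harg]
      congr 1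
      refine Finset.sum_congr rfl ?_
      intro k hk
      have hkx : k ≠ x := Finset.ne_of_mem_erase hk
      have hc : List.count k (x :: xs) = List.count k xs := by
        simp [Ne.symm hkx]
      rw [hc]
    · have hqnot : q ∉ x :: xs := by
        intro hmem
        rcases List.mem_cons.mp hmem with h | h
        · exact hpq h.symm
        · exact hpq (le_antisymm (hx q h) (hq x (List.mem_cons_self)))
      have hstep : pvStep (sc, run, some q) x
          = (sc + pvPoints (some q) run, 1, some x) := by
        simp [pvStep, fun h : x = q => hpq h]
      rw [List.foldl_cons, hstep, ih hs' _ 1 x hx]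
      have hq0 : (x :: xs).count q = 0 := List.count_eq_zero.mpr hqnot
      have herase : ((x :: xs).toFinset).erase q = (x :: xs).toFinset := by
        apply Finset.erase_eq_self.mpr
        simp only [List.mem_toFinset]; exact hqnot
      rw [hq0, herase]
      have hsum : ∑ k ∈ (x :: xs).toFinset, pvPoints (some k) (((x :: xs).count k : Int))
          = pvPoints (some x) ((1 : Int) + (xs.count x : Int))
            + ∑ k ∈ xs.toFinset.erase x, pvPoints (some k) ((xs.count k : Int)) := by
        have hmem : x ∈ (x :: xs).toFinset := by simp
        rw [← Finset.add_sum_erase _ _ hmem]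
        congr 1
        · congr 1
          rw [List.count_cons_self]
          push_cast; ring
        · rw [List.toFinset_cons, Finset.erase_insert_eq_erase]
          refine Finset.sum_congr rfl ?_
          intro k hk
          have hkx : k ≠ x := Finset.ne_of_mem_erase hk
          have hc : List.count k (x :: xs) = List.count k xs := by
            simp [Ne.symm hkx]
          rw [hc]
      rw [hsum]
      push_cast
      ring_nf
-- B's whole scan = the sum of contributions over the distinct patterns of its sorted list
theorem pvAltSum (s : List String) (hs : s.Pairwise (· ≤ ·)) :
    (let st := s.foldl pvStep ((0 : Int), (0 : Int), (none : Option String));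
     st.1 + pvPoints st.2.2 st.2.1)
    = ∑ k ∈ s.toFinset, pvContrib s k := by
  cases s with
  | nil => simp [pvPoints]
  | cons x xs =>
    have hx : ∀ y ∈ xs, x ≤ y := fun y hy => (List.pairwise_cons.mp hs).1 y hy
    have hs' : xs.Pairwise (· ≤ ·) := (List.pairwise_cons.mp hs).2
    have hstep : pvStep (0, 0, none) x = (0, 1, some x) := by simp [pvStep, pvPoints]
    show (let st := List.foldl pvStep (pvStep (0, 0, none) x) xs; st.1 + pvPoints st.2.2 st.2.1) = _
    rw [hstep, pvRunScan xs hs' 0 1 x hx]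
    have hmem : x ∈ (x :: xs).toFinset := by simp
    rw [← Finset.add_sum_erase _ _ hmem]
    simp only [pvContrib]
    have h1 : pvPoints (some x) (1 + (xs.count x : Int))
        = pvPoints (some x) (((x :: xs).count x : Int)) := by
      congr 1
      rw [List.count_cons_self]; push_cast; ring
    have h2 : ∑ k ∈ xs.toFinset.erase x, pvPoints (some k) ((xs.count k : Int))
        = ∑ k ∈ ((x :: xs).toFinset).erase x, pvPoints (some k) (((x :: xs).count k : Int)) := by
      rw [List.toFinset_cons, Finset.erase_insert_eq_erase]
      refine Finset.sum_congr rfl ?_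
      intro k hk
      have hkx : k ≠ x := Finset.ne_of_mem_erase hk
      have hc : List.count k (x :: xs) = List.count k xs := by
        simp [Ne.symm hkx]
      rw [hc]
    rw [h1, h2]
    ring

-- ===== VERDICT (by name: the statement is the Claim_ definition above) =====
theorem score_for_opener_spec : Claim_equal_score_for_opener := by
  intro lookup guess _
  unfold Spec_score_for_opener score_for_opener score_for_opener_alt
  dsimp only
  set pairs : List (String × String) :=
    lookup.flatMap (fun sg =>
      sg.2.flatMap (fun gp => if gp.1 == guess then [(gp.2, sg.1)] else [])) with hpairs
  set pats : List String :=
    lookup.flatMap (fun sg =>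
      sg.2.flatMap (fun gp => if gp.1 == guess then [gp.2] else [])) with hpats
  set d : PySem.Dict String (List (String × String)) :=
    pairs.foldl (fun out x => out.modify x.1 [] (fun l => l ++ [x])) PySem.Dict.empty with hd
  -- view A's grouping loop as a modify-append loop over (key, value) pairs
  have hd' : d = (pairs.map (fun x => (x.1, x))).foldl
      (fun out p => out.modify p.1 [] (fun l => l ++ [p.2])) PySem.Dict.empty := by
    rw [hd, List.foldl_map]
  have hkeys : d.keys = PySem.Set.ofList (pairs.map Prod.fst) := by
    rw [hd', PySem.Dict.keys_foldl_modify_key (key := Prod.fst)]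
    rw [PySem.Dict.keys_empty, PySem.Set.update_nil_left, List.map_map]
    rfl
  have hnodup : d.keys.Nodup := by
    rw [hkeys]; exact PySem.Set.nodup_ofList _
  have hlen : ∀ k : String, ((d.getD k []).length : Int) = ((pairs.map Prod.fst).count k : Int) := by
    intro k
    rw [hd', PySem.Dict.getD_foldl_modify_append, PySem.Dict.getD_empty]
    simp only [List.nil_append, List.length_map, List.filter_map,
      List.count, List.countP_map, Function.comp_def, ← List.countP_eq_length_filter]
  -- A = sum over the dict's keys of the per-pattern contribution
  rw [PySem.Dict.items_eq_map_keys d hnodup [], pvFoldScore, List.map_map]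
  simp only [Function.comp_def, zero_add]
  have hA : (d.keys.map (fun k => pvPoints (some k) ((d.getD k []).length : Int))).sum
      = ∑ k ∈ d.keys.toFinset, pvContrib (pairs.map Prod.fst) k := by
    rw [← List.sum_toFinset _ hnodup]
    refine Finset.sum_congr rfl ?_
    intro k _
    rw [pvContrib, ← hlen k]
  rw [hA]
  -- B = the same sum, over the sorted flat pattern list
  have hfst : pairs.map Prod.fst = pats := pvPairsFst lookup guess
  set ss : List String := PySem.List.sorted pats (fun x => x) false with hss
  have hperm : ss.Perm pats := PySem.List.sorted_perm pats (fun x => x) false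
  have hsorted : ss.Pairwise (· ≤ ·) := PySem.List.sorted_pairwise pats (fun x => x)
  rw [pvAltSum ss hsorted]
  have hfin : d.keys.toFinset = ss.toFinset := by
    rw [hkeys, hfst, List.toFinset_eq_of_perm _ _ hperm]
    apply Finset.ext
    intro a
    simp [List.mem_toFinset, PySem.Set.mem_ofList]
  rw [hfin]
  refine Finset.sum_congr rfl ?_
  intro k _
  simp only [pvContrib, hfst, hperm.count_eq]
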